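-- pv_equiv track=rewrite | github.com/Deholay/QBH_project | src/MelodyMatching.py | simplified_notation_to_midi
-- ===== SOURCE A (Python) =====
-- def simplified_notation_to_midi(simplified_notation):
--     """
--     Convert simplified notation to MIDI numbers and calculate MIDI differences.
--     """
--     # Mapping for simplified notation to MIDI
--     notation_to_midi = {
--         '1': 48, '2': 50, '3': 52, '4': 53,
--         '5': 55, '6': 57, '7': 59,
--         'A': 36, 'B': 38, 'C': 40, 'D': 41,
--         'E': 43, 'F': 45, 'G': 47,
--         'H': 60, 'I': 62, 'J': 64, 'K': 65,
--         'L': 67, 'M': 69, 'N': 71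
--     }
--
--     # Convert simplified notation to MIDI numbers
--     midi_numbers = []
--     for note in simplified_notation:
--         midi = notation_to_midi.get(note)
--         if midi is not None:
--             midi_numbers.append(midi)
--         else:
--             raise ValueError(f"Invalid note in simplified notation: {note}")
--
--     # Calculate MIDI differences
--     midi_differences = [
--         midi_numbers[i] - midi_numbers[i - 1]
--         for i in range(1, len(midi_numbers))
--     ]
--
--     return midi_numbers, midi_differences
-- ===== SOURCE B (Python) =====
-- def simplified_notation_to_midi(simplified_notation):
--     """Single pass: look up each note and maintain a running 'previous' value."""
--     notation_to_midi = {
--         '1': 48, '2': 50, '3': 52, '4': 53,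
--         '5': 55, '6': 57, '7': 59,
--         'A': 36, 'B': 38, 'C': 40, 'D': 41,
--         'E': 43, 'F': 45, 'G': 47,
--         'H': 60, 'I': 62, 'J': 64, 'K': 65,
--         'L': 67, 'M': 69, 'N': 71
--     }
--     midi_numbers = []
--     midi_differences = []
--     prev = None
--     for note in simplified_notation:
--         midi = notation_to_midi.get(note)
--         if midi is None:
--             raise ValueError(f"Invalid note in simplified notation: {note}")
--         midi_numbers.append(midi)
--         if prev is not None:
--             midi_differences.append(midi - prev)
--         prev = midi
--     return midi_numbers, midi_differences
-- ===== Notes on version B (the rewrite author's own statement) =====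
-- stated objective: alternative
-- what changed: Fuses A's two passes (build the full MIDI list, then a second indexed comprehension for differences) into one loop that threads a running 'previous' value and emits each difference as the note is looked up.
import Mathlib
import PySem

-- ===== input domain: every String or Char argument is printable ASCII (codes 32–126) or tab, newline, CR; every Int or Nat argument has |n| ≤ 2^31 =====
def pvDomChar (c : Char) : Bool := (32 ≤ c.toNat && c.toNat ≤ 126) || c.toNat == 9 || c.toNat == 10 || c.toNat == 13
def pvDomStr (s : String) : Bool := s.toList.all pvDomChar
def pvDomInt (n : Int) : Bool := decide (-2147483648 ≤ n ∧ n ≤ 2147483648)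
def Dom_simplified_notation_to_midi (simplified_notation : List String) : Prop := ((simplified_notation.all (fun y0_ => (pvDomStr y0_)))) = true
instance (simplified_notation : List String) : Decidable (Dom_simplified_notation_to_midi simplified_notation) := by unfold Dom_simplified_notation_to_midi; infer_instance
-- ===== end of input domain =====

-- B fuses A's two passes into one loop threading a running 'previous' value; same result on valid notation.
-- Pre_ excludes inputs containing a note outside the mapping, on which Python A raises ValueError.


-- ===== PORT A =====
-- the dict literal notation_to_midi (shared by both Pythons verbatim)
def notationToMidi : PySem.Dict String Int := PySem.Dict.ofList
  [("1", 48), ("2", 50), ("3", 52), ("4", 53),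
   ("5", 55), ("6", 57), ("7", 59),
   ("A", 36), ("B", 38), ("C", 40), ("D", 41),
   ("E", 43), ("F", 45), ("G", 47),
   ("H", 60), ("I", 62), ("J", 64), ("K", 65),
   ("L", 67), ("M", 69), ("N", 71)]

-- A's first loop: append each looked-up value; 'none' accumulator = the raised ValueError
def midiNumbersA (simplified_notation : List String) : Option (List Int) :=
  simplified_notation.foldl
    (fun acc note => acc.bind (fun l => (notationToMidi.get? note).map (fun m => l ++ [m])))
    (some [])

-- A's second pass: [midi[i] - midi[i-1] for i in range(1, len(midi))]
def midiDifferencesA (midi_numbers : List Int) : List Int :=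
  (PySem.List.pyRange 1 (PySem.List.len midi_numbers) 1).map
    (fun i => PySem.List.pyGetD midi_numbers i 0 - PySem.List.pyGetD midi_numbers (i - 1) 0)

def simplified_notation_to_midi (simplified_notation : List String) : List Int × List Int :=
  match midiNumbersA simplified_notation with
  | none => ([], [])   -- ValueError: unreached under Pre_
  | some midi_numbers => (midi_numbers, midiDifferencesA midi_numbers)

-- ===== PORT B =====
-- B's single loop: look up, emit the number, emit a difference when a previous value exists
def goB (prev : Option Int) (notes : List String) : List Int × List Int :=
  match notes with
  | [] => ([], [])
  | note :: rest =>
    match notationToMidi.get? note with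
    | none => ([], [])   -- ValueError: unreached under Pre_
    | some m =>
      let (ms, ds) := goB (some m) rest
      (m :: ms, match prev with | none => ds | some p => (m - p) :: ds)

def simplified_notation_to_midi_alt (simplified_notation : List String) : List Int × List Int :=
  goB none simplified_notation

-- ===== PRECONDITION & SPEC =====
-- Pre_ excludes inputs with a note outside the mapping: there Python A raises ValueError.
def Pre_simplified_notation_to_midi (simplified_notation : List String) : Prop :=
  ∀ s ∈ simplified_notation, (notationToMidi.get? s).isSome = true
instance (simplified_notation : List String) : Decidable (Pre_simplified_notation_to_midi simplified_notation) := by unfold Pre_simplified_notation_to_midi; infer_instance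
def pvWitness_simplified_notation_to_midi : List String := ["1", "5", "A", "N", "H"]

def Spec_simplified_notation_to_midi (simplified_notation : List String) (out : List Int × List Int) : Prop := out = simplified_notation_to_midi_alt simplified_notation
instance (simplified_notation : List String) (out : List Int × List Int) : Decidable (Spec_simplified_notation_to_midi simplified_notation out) := by unfold Spec_simplified_notation_to_midi; infer_instance

-- ===== CLAIM (what is proved, stated in full; the proofs are below) =====
def Claim_equal_simplified_notation_to_midi : Prop := ∀ (simplified_notation : List String), Dom_simplified_notation_to_midi simplified_notation → Pre_simplified_notation_to_midi simplified_notation → Spec_simplified_notation_to_midi simplified_notation (simplified_notation_to_midi simplified_notation)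

-- ===== LEMMAS AND PROOFS =====

-- the looked-up values, as a map (proof-side characterisation of both loops)
def lookedUp (notes : List String) : List Int :=
  notes.map (fun n => (notationToMidi.get? n).getD 0)

lemma midiNumbersA_eq (notes : List String) (acc : List Int)
    (h : ∀ s ∈ notes, (notationToMidi.get? s).isSome = true) :
    notes.foldl
      (fun acc note => acc.bind (fun l => (notationToMidi.get? note).map (fun m => l ++ [m])))
      (some acc) = some (acc ++ lookedUp notes) := by
  induction notes generalizing acc with
  | nil => simp [lookedUp]
  | cons n rest ih =>
    have hn := h n (by simp)
    obtain ⟨m, hm⟩ := Option.isSome_iff_exists.mp hn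
    simp only [List.foldl_cons, Option.bind_some, hm, Option.map_some]
    rw [ih (acc ++ [m]) (fun s hs => h s (by simp [hs]))]
    simp [lookedUp, hm]

lemma goB_eq (notes : List String) (prev : Option Int)
    (h : ∀ s ∈ notes, (notationToMidi.get? s).isSome = true) :
    goB prev notes =
      (lookedUp notes,
       List.zipWith (fun a b => b - a)
         (match prev with | none => lookedUp notes | some p => p :: lookedUp notes)
         (match prev with | none => (lookedUp notes).tail | some _ => lookedUp notes)) := by
  induction notes generalizing prev with
  | nil => cases prev <;> simp [goB, lookedUp]
  | cons n rest ih =>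
    have hn := h n (by simp)
    obtain ⟨m, hm⟩ := Option.isSome_iff_exists.mp hn
    have hrest : ∀ s ∈ rest, (notationToMidi.get? s).isSome = true :=
      fun s hs => h s (by simp [hs])
    have := ih (some m) hrest
    cases prev <;> simp [goB, hm, this, lookedUp]

lemma midiDifferencesA_eq (ms : List Int) :
    midiDifferencesA ms = List.zipWith (fun a b => b - a) ms ms.tail := by
  apply List.ext_getElem
  · simp [midiDifferencesA, PySem.List.length_pyRange_one]
  · intro k h1 h2
    simp only [midiDifferencesA, List.getElem_map, PySem.List.getElem_pyRange_one]
    have hk1 : k + 1 < ms.length := by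
      simp [List.length_zipWith] at h2; omega
    rw [show (1 : Int) + (k : Int) - 1 = (k : Int) by ring]
    rw [show (1 : Int) + (k : Int) = ((k + 1 : Nat) : Int) by push_cast; ring]
    rw [PySem.List.pyGetD_natCast, PySem.List.pyGetD_natCast]
    rw [List.getElem_zipWith]
    simp [hk1, List.getElem_tail, Nat.lt_of_succ_lt hk1]

-- ===== VERDICT (by name: the statement is the Claim_ definition above) =====
theorem simplified_notation_to_midi_spec : Claim_equal_simplified_notation_to_midi := by
  intro xs _ hpre
  unfold Spec_simplified_notation_to_midi simplified_notation_to_midi simplified_notation_to_midi_alt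
  rw [show midiNumbersA xs = some ([] ++ lookedUp xs) from midiNumbersA_eq xs [] hpre]
  rw [goB_eq xs none hpre]
  simp [midiDifferencesA_eq]
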